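-- pv_equiv track=rewrite | github.com/tomtiao/LinguaGacha | api/Application/TaskAppService.py | resolve_item_ids
-- ===== SOURCE A (Python) =====
-- def resolve_item_ids(raw_item_ids: object) -> list[int]:
--     if not isinstance(raw_item_ids, list):
--         return []
--
--     item_ids: list[int] = []
--     seen_ids: set[int] = set()
--     for raw_item_id in raw_item_ids:
--         try:
--             item_id = int(raw_item_id)
--         except TypeError:
--             continue
--         except ValueError:
--             continue
--         if item_id in seen_ids:
--             continue
--         seen_ids.add(item_id)
--         item_ids.append(item_id)
--     return item_ids
-- ===== SOURCE B (Python) =====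
-- def resolve_item_ids(raw_item_ids: object) -> list:
--     if not isinstance(raw_item_ids, list):
--         return []
--     # stage 1: convert, skipping unconvertible elements
--     converted = []
--     for raw_item_id in raw_item_ids:
--         try:
--             converted.append(int(raw_item_id))
--         except (TypeError, ValueError):
--             continue
--     # stage 2: map each value to its FIRST index (reversed iteration: later
--     # inserts overwrite, so the smallest index wins), no membership tests
--     first_index = {value: index for index, value in reversed(list(enumerate(converted)))}
--     # stage 3: emit values in order of their first occurrence
--     return [converted[index] for index in sorted(first_index.values())]
-- ===== Notes on version B (the rewrite author's own statement) =====
-- stated objective: alternative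
-- what changed: Replaces A's streaming loop with a seen-set membership test per element by three set-free stages: a conversion pass, a reversed dict comprehension whose overwrites leave each value's first index, and a sort of those indices followed by indexing back.
import Mathlib
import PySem

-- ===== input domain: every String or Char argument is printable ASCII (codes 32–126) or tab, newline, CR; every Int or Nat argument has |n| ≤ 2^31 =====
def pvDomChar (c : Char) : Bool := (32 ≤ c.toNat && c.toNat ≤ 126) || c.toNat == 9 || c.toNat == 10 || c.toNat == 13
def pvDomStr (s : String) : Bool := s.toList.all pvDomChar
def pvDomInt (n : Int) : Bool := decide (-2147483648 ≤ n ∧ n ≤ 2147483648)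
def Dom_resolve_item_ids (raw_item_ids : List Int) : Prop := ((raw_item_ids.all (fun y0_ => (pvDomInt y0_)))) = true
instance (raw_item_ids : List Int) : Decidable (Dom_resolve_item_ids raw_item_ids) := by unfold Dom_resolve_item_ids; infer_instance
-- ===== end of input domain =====

-- B replaces A's streaming loop with a per-element seen-set membership test by three
-- set-free stages: a conversion pass, a reversed dict comprehension whose overwrites
-- leave each value's first index, and a sort of those indices followed by indexing back;
-- objective: alternative (not faster). On the ported domain (List Int) the isinstance
-- guard always passes and int() is the identity and never raises.

-- ===== PORT A =====
-- A: one loop maintaining item_ids and seen_ids (a set); the try/except arms are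
-- identities here since int(raw_item_id) on an Int is the value itself.
def resolve_item_ids (raw_item_ids : List Int) : List Int :=
  (raw_item_ids.foldl
    (fun (st : List Int × PySem.Set Int) raw_item_id =>
      let item_id := raw_item_id                       -- int(raw_item_id)
      if PySem.Set.contains st.2 item_id then st       -- if item_id in seen_ids: continue
      else (st.1 ++ [item_id], PySem.Set.add st.2 item_id))
    ([], PySem.Set.empty)).1

-- ===== PORT B =====
-- B: stage 1 builds `converted` by appending (identity conversion on Int); stage 2 is the
-- dict comprehension over reversed(list(enumerate(converted))); stage 3 sorts the dict's
-- values and indexes back into `converted` (every index is in range, so pyGetD is exact).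
def resolve_item_ids_alt (raw_item_ids : List Int) : List Int :=
  let converted := raw_item_ids.foldl (fun acc raw_item_id => acc ++ [raw_item_id]) []
  let first_index : PySem.Dict Int Int :=
    ((PySem.List.enumerate converted).reverse).foldl
      (fun d p => d.insert p.2 p.1) PySem.Dict.empty
  (PySem.List.sorted (PySem.Dict.values first_index) (fun index => index) false).map
    (fun index => PySem.List.pyGetD converted index 0)

-- ===== PRECONDITION & SPEC =====
def Spec_resolve_item_ids (raw_item_ids : List Int) (out : List Int) : Prop := out = resolve_item_ids_alt raw_item_ids
instance (raw_item_ids : List Int) (out : List Int) : Decidable (Spec_resolve_item_ids raw_item_ids out) := by unfold Spec_resolve_item_ids; infer_instance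

-- ===== CLAIM (what is proved, stated in full; the proofs are below) =====
def Claim_equal_resolve_item_ids : Prop := ∀ (raw_item_ids : List Int), Dom_resolve_item_ids raw_item_ids → Spec_resolve_item_ids raw_item_ids (resolve_item_ids raw_item_ids)

-- ===== LEMMAS AND PROOFS =====

-- proof-side reference: the first-occurrence indices of xs, in first-seen order
def pvFirstIdx (xs : List Int) : List Int :=
  (PySem.List.dedup xs).map (fun v => (List.idxOf v xs : Int))

-- A's loop invariant: when the accumulator's two components are the same list,
-- A's fold tracks PySem.Set.add on that list.
theorem loopA_eq_setFold (xs : List Int) (s : List Int) :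
    (xs.foldl
      (fun (st : List Int × PySem.Set Int) x =>
        if PySem.Set.contains st.2 x then st else (st.1 ++ [x], PySem.Set.add st.2 x))
      (s, s)).1 = xs.foldl PySem.Set.add s := by
  induction xs generalizing s with
  | nil => rfl
  | cons x xs ih =>
    rw [List.foldl_cons, List.foldl_cons]
    split
    · next h =>
        rw [show PySem.Set.add s x = s from by
          unfold PySem.Set.add; rw [if_pos h]]
        exact ih s
    · next h =>
        rw [show PySem.Set.add s x = s ++ [x] from by
          unfold PySem.Set.add; rw [if_neg h]]
        exact ih (s ++ [x])

theorem A_eq_dedup (xs : List Int) :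
    resolve_item_ids xs = PySem.List.dedup xs := by
  unfold resolve_item_ids
  rw [PySem.List.dedup_eq_ofList, PySem.Set.ofList_eq_foldl]
  exact loopA_eq_setFold xs []

-- the dict built from the reversed enumeration maps each value to its FIRST index
theorem dget (t : List Int) : ∀ (s : Int) (d : PySem.Dict Int Int) (v : Int),
    (((PySem.List.enumerate t s).reverse).foldl
      (fun d p => d.insert p.2 p.1) d).get? v
    = if v ∈ t then some (s + (List.idxOf v t : Int)) else d.get? v := by
  induction t with
  | nil => intro s d v; simp [PySem.List.enumerate_nil]
  | cons x t' ih =>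
    intro s d v
    rw [PySem.List.enumerate_cons, List.reverse_cons, List.foldl_append]
    by_cases hv : v = x
    · subst hv
      simp [PySem.Dict.get?_insert_self]
    · rw [List.foldl_cons, List.foldl_nil]
      rw [PySem.Dict.get?_insert_of_ne _ _ hv, ih (s + 1) d v]
      by_cases hm : v ∈ t'
      · rw [if_pos hm, if_pos (by simp [hm])]
        rw [List.idxOf_cons_ne _ (by simpa using Ne.symm hv)]
        push_cast
        ring_nf
      · rw [if_neg hm, if_neg (by simp [hv, hm])]

theorem dkeys_nodup (t : List (Int × Int)) : ∀ (d : PySem.Dict Int Int),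
    d.keys.Nodup → (t.foldl (fun d p => d.insert p.2 p.1) d).keys.Nodup := by
  induction t with
  | nil => intro d h; exact h
  | cons p t' ih =>
    intro d h
    exact ih _ (PySem.Dict.nodup_keys_insert d p.2 p.1 h)

-- membership in a Nodup-keyed dict's values is existence of a key looked up to it
theorem mem_values_iff (d : PySem.Dict Int Int) (hk : d.keys.Nodup) (i : Int) :
    i ∈ d.values ↔ ∃ v, d.get? v = some i := by
  constructor
  · intro h
    rcases List.mem_map.mp h with ⟨p, hp, hpi⟩
    refine ⟨p.1, ?_⟩
    have hg := PySem.Dict.get?_of_mem_items d (k := p.1) (v := p.2) (by simpa using hp) hk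
    rw [hg, hpi]
  · rintro ⟨v, hv⟩
    have hvk : v ∈ d.keys := by
      by_contra hnk
      rw [(PySem.Dict.get?_eq_none_iff_not_mem_keys d v).mpr hnk] at hv
      simp at hv
    rcases List.mem_map.mp hvk with ⟨p, hp, hpf⟩
    have := PySem.Dict.get?_of_mem_items d (k := p.1) (v := p.2) (by simpa using hp) hk
    rw [hpf, hv] at this
    have hsnd : p.2 = i := by injection this.symm
    exact List.mem_map.mpr ⟨p, hp, hsnd⟩

-- values of a Nodup-keyed dict are Nodup when no value is shared between two keys
theorem values_nodup (d : PySem.Dict Int Int) (hk : d.keys.Nodup)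
    (hinj : ∀ k1 k2 i, d.get? k1 = some i → d.get? k2 = some i → k1 = k2) :
    d.values.Nodup := by
  have hitems : d.items.Nodup := (List.Nodup.of_map _ hk)
  refine List.Nodup.map_on ?_ hitems
  intro p hp q hq hpq
  have h1 := PySem.Dict.get?_of_mem_items d (k := p.1) (v := p.2) (by simpa using hp) hk
  have h2 := PySem.Dict.get?_of_mem_items d (k := q.1) (v := q.2) (by simpa using hq) hk
  have hfst : p.1 = q.1 := hinj _ _ p.2 h1 (by rw [h2, hpq])
  exact Prod.ext hfst hpq

-- on dedup ys, first-occurrence indices are strictly increasing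
theorem dedup_pairwise_idxOf (ys : List Int) :
    (PySem.List.dedup ys).Pairwise
      (fun a b => (List.idxOf a ys : Int) < (List.idxOf b ys : Int)) := by
  induction ys using List.reverseRecOn with
  | nil => simp [PySem.List.dedup]
  | append_singleton l x ih =>
    have hded : PySem.List.dedup (l ++ [x])
        = if x ∈ PySem.List.dedup l then PySem.List.dedup l
          else PySem.List.dedup l ++ [x] := by
      rw [PySem.List.dedup_eq_ofList, PySem.Set.ofList_append_singleton,
        PySem.Set.add_eq_ite, ← PySem.List.dedup_eq_ofList]
    rw [hded]
    by_cases hx : x ∈ PySem.List.dedup l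
    · rw [if_pos hx]
      refine ih.imp_of_mem ?_
      intro a b ha hb h
      rwa [List.idxOf_append_of_mem ((PySem.List.mem_dedup l a).mp ha),
        List.idxOf_append_of_mem ((PySem.List.mem_dedup l b).mp hb)]
    · rw [if_neg hx]
      have hxl : x ∉ l := fun h => hx ((PySem.List.mem_dedup l x).mpr h)
      rw [List.pairwise_append]
      refine ⟨ih.imp_of_mem ?_, List.pairwise_singleton _ _, ?_⟩
      · intro a b ha hb h
        rwa [List.idxOf_append_of_mem ((PySem.List.mem_dedup l a).mp ha),
          List.idxOf_append_of_mem ((PySem.List.mem_dedup l b).mp hb)]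
      · intro a ha b hb
        have ha' : a ∈ l := (PySem.List.mem_dedup l a).mp ha
        have hb' : b = x := by simpa using hb
        subst hb'
        rw [List.idxOf_append_of_mem ha',
          List.idxOf_append, if_neg hxl, List.idxOf_cons_self]
        have := List.idxOf_lt_length_of_mem ha'
        push_cast
        omega

-- pvFirstIdx is strictly increasing
theorem pvFirstIdx_pairwise (xs : List Int) :
    (pvFirstIdx xs).Pairwise (fun a b => a < b) := by
  unfold pvFirstIdx
  exact List.Pairwise.map _ (fun a b h => h) (dedup_pairwise_idxOf xs)

theorem B_eq_dedup (xs : List Int) :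
    resolve_item_ids_alt xs = PySem.List.dedup xs := by
  unfold resolve_item_ids_alt
  simp only [PySem.List.foldl_append_singleton, List.nil_append]
  set dxs : PySem.Dict Int Int :=
    ((PySem.List.enumerate xs).reverse).foldl
      (fun d p => d.insert p.2 p.1) PySem.Dict.empty with hdxs
  have hget : ∀ v, dxs.get? v
      = if v ∈ xs then some ((List.idxOf v xs : Int)) else none := by
    intro v
    rw [hdxs, dget xs 0 PySem.Dict.empty v]
    simp [PySem.Dict.get?_empty]
  have hkeys : dxs.keys.Nodup := by
    rw [hdxs]
    exact dkeys_nodup _ _ PySem.Dict.nodup_keys_empty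
  have hinj : ∀ k1 k2 i, dxs.get? k1 = some i → dxs.get? k2 = some i → k1 = k2 := by
    intro k1 k2 i h1 h2
    rw [hget k1] at h1; rw [hget k2] at h2
    by_cases m1 : k1 ∈ xs
    · by_cases m2 : k2 ∈ xs
      · rw [if_pos m1] at h1; rw [if_pos m2] at h2
        have hi1 : ((List.idxOf k1 xs : Int)) = i := by injection h1
        have hi2 : ((List.idxOf k2 xs : Int)) = i := by injection h2
        have hidx : List.idxOf k1 xs = List.idxOf k2 xs := by
          have := hi1.trans hi2.symm
          exact_mod_cast this
        have l1 := List.idxOf_lt_length_of_mem m1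
        have l2 := List.idxOf_lt_length_of_mem m2
        calc k1 = xs[List.idxOf k1 xs] := (List.getElem_idxOf l1).symm
          _ = xs[List.idxOf k2 xs] := by simp [hidx]
          _ = k2 := List.getElem_idxOf l2
      · rw [if_neg m2] at h2; exact absurd h2 (by simp)
    · rw [if_neg m1] at h1; exact absurd h1 (by simp)
  have hFnodup : (pvFirstIdx xs).Nodup :=
    (pvFirstIdx_pairwise xs).imp (fun h => ne_of_lt h)
  have hVnodup : dxs.values.Nodup := values_nodup dxs hkeys hinj
  have hmemF : ∀ i, i ∈ pvFirstIdx xs ↔ ∃ v ∈ xs, i = ((List.idxOf v xs : Int)) := by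
    intro i
    unfold pvFirstIdx
    rw [List.mem_map]
    constructor
    · rintro ⟨v, hv, rfl⟩
      exact ⟨v, (PySem.List.mem_dedup xs v).mp hv, rfl⟩
    · rintro ⟨v, hv, rfl⟩
      exact ⟨v, (PySem.List.mem_dedup xs v).mpr hv, rfl⟩
  have hperm : (pvFirstIdx xs).Perm dxs.values := by
    rw [List.perm_ext_iff_of_nodup hFnodup hVnodup]
    intro i
    rw [hmemF i, mem_values_iff dxs hkeys i]
    constructor
    · rintro ⟨v, hv, rfl⟩
      exact ⟨v, by rw [hget v, if_pos hv]⟩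
    · rintro ⟨v, hv⟩
      rw [hget v] at hv
      by_cases m : v ∈ xs
      · rw [if_pos m] at hv
        exact ⟨v, m, by injection hv.symm⟩
      · rw [if_neg m] at hv; exact absurd hv (by simp)
  rw [PySem.List.sorted_eq_of_perm_of_pairwise_lt dxs.values (pvFirstIdx xs)
    (fun index => index) hperm (pvFirstIdx_pairwise xs)]
  unfold pvFirstIdx
  rw [List.map_map]
  have : ∀ v ∈ PySem.List.dedup xs,
      ((fun index => PySem.List.pyGetD xs index 0) ∘ fun v => ((List.idxOf v xs : Int))) v = v := by
    intro v hv
    have hm : v ∈ xs := (PySem.List.mem_dedup xs v).mp hv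
    have hl := List.idxOf_lt_length_of_mem hm
    simp only [Function.comp]
    rw [PySem.List.pyGetD_natCast, List.getD_eq_getElem _ _ hl, List.getElem_idxOf hl]
  rw [List.map_congr_left this]
  simp

-- ===== VERDICT (by name: the statement is the Claim_ definition above) =====
theorem resolve_item_ids_spec : Claim_equal_resolve_item_ids := by
  intro xs _
  unfold Spec_resolve_item_ids
  rw [A_eq_dedup, B_eq_dedup]
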